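-- pv_equiv track=rewrite | github.com/TuftsRT/autoslug | autoslug/autoslug.py | shorten_stem
-- ===== SOURCE A (Python) =====
-- from typing import Dict, Optional, Set, Tuple
--
-- def shorten_stem(stem: str, max_length: Optional[int], sep: str) -> str:
--     if len(stem) <= max_length:
--         return stem
--     parts = stem.split(sep)
--     new_stem = parts.pop(0)
--     for part in parts:
--         if len(new_stem) + len(sep) + len(part) > max_length:
--             break
--         new_stem += sep + part
--     return new_stem
-- ===== SOURCE B (Python) =====
-- def shorten_stem(stem: str, max_length, sep: str) -> str:
--     if len(stem) <= max_length:
--         return stem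
--     parts = stem.split(sep)
--     while len(parts) > 1 and len(sep.join(parts)) > max_length:
--         parts.pop()
--     return sep.join(parts)
-- ===== Notes on version B (the rewrite author's own statement) =====
-- stated objective: simpler
-- what changed: B splits once and pops whole parts off the END while the re-joined string still exceeds max_length, instead of A's forward accumulation with an explicit break; same longest-fitting prefix because the joined length grows monotonically.
import Mathlib
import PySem

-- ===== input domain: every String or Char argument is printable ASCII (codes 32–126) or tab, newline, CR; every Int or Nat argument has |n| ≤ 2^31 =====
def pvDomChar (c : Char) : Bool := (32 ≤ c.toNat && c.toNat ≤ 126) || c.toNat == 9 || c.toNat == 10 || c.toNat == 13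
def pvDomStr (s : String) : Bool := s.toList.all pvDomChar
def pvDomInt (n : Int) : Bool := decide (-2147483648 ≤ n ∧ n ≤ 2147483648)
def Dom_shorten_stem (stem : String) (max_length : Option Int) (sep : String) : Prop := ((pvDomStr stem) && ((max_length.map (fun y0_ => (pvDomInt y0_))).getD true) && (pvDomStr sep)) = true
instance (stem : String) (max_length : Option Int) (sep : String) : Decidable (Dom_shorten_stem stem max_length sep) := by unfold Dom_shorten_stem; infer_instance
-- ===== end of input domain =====

-- B drops whole separator-parts from the END of the split, re-joining each time, instead of
-- A's forward accumulation with a break; same result, different traversal (objective: simpler).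

-- ===== PORT A =====
-- A's for-loop with break: accumulate parts forward while the extended stem still fits.
def pvALoop (m : Int) (sep : List Char) (acc : List Char) : List (List Char) → List Char
  | [] => acc
  | p :: ps =>
    if m < (acc.length : Int) + sep.length + p.length then acc
    else pvALoop m sep (acc ++ sep ++ p) ps

def shorten_stem (stem : String) (max_length : Option Int) (sep : String) : String :=
  let m := max_length.getD 0    -- Pre_ guarantees max_length is an int (None raises TypeError)
  if (stem.toList.length : Int) ≤ m then stem
  else
    match PySem.Chars.split? stem.toList sep.toList with
    | none => ""                 -- ValueError (empty separator): excluded by Pre_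
    | some parts =>
      match parts with
      | [] => ""                 -- unreachable: str.split never returns an empty list
      | p0 :: rest => String.ofList (pvALoop m sep.toList p0 rest)

-- ===== PORT B =====
-- B's while-loop: pop the last part while there are ≥ 2 parts and the re-joined string is too long.
def pvBLoop (m : Int) (sep : List Char) (parts : List (List Char)) : List (List Char) :=
  if 1 < parts.length ∧ m < ((PySem.Chars.join sep parts).length : Int) then
    pvBLoop m sep parts.dropLast
  else parts
termination_by parts.length
decreasing_by simp only [List.length_dropLast]; omega

def shorten_stem_alt (stem : String) (max_length : Option Int) (sep : String) : String :=
  let m := max_length.getD 0    -- Pre_ guarantees max_length is an int (None raises TypeError)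
  if (stem.toList.length : Int) ≤ m then stem
  else
    match PySem.Chars.split? stem.toList sep.toList with
    | none => ""                 -- ValueError (empty separator): excluded by Pre_
    | some parts => String.ofList (PySem.Chars.join sep.toList (pvBLoop m sep.toList parts))

-- ===== PRECONDITION & SPEC =====
-- Pre_ excludes exactly the inputs where A raises: max_length = None (TypeError on '<='),
-- and an empty separator when the stem does not already fit (ValueError from str.split).
def Pre_shorten_stem (stem : String) (max_length : Option Int) (sep : String) : Prop :=
  max_length.isSome = true ∧ (sep ≠ "" ∨ (stem.toList.length : Int) ≤ max_length.getD 0)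
instance (stem : String) (max_length : Option Int) (sep : String) : Decidable (Pre_shorten_stem stem max_length sep) := by unfold Pre_shorten_stem; infer_instance

def pvWitness_shorten_stem : String × Option Int × String := ("alpha-beta-gamma", some 10, "-")

def Spec_shorten_stem (stem : String) (max_length : Option Int) (sep : String) (out : String) : Prop := out = shorten_stem_alt stem max_length sep
instance (stem : String) (max_length : Option Int) (sep : String) (out : String) : Decidable (Spec_shorten_stem stem max_length sep out) := by unfold Spec_shorten_stem; infer_instance

-- ===== CLAIM (what is proved, stated in full; the proofs are below) =====
def Claim_equal_shorten_stem : Prop := ∀ (stem : String) (max_length : Option Int) (sep : String), Dom_shorten_stem stem max_length sep → Pre_shorten_stem stem max_length sep → Spec_shorten_stem stem max_length sep (shorten_stem stem max_length sep)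

-- ===== LEMMAS AND PROOFS =====

-- the common reference: the prefix of parts kept, tracking the running joined length c
def pvTakeFit (m : Int) (sep : List Char) (c : Nat) : List (List Char) → List (List Char)
  | [] => []
  | p :: ps =>
    if m < (c : Int) + sep.length + p.length then []
    else p :: pvTakeFit m sep (c + sep.length + p.length) ps

-- total cost the tail parts add to the joined length
def pvCost (sep : List Char) (ps : List (List Char)) : Nat :=
  (ps.map (fun p => sep.length + p.length)).sum

theorem pvCost_nil (sep : List Char) : pvCost sep [] = 0 := rfl

theorem pvCost_cons (sep p : List Char) (ps : List (List Char)) :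
    pvCost sep (p :: ps) = sep.length + p.length + pvCost sep ps := by
  simp [pvCost, Nat.add_assoc]

theorem intercalate_cons₂ (sep a b : List Char) (L : List (List Char)) :
    sep.intercalate (a :: b :: L) = a ++ sep ++ sep.intercalate (b :: L) := by
  simp [List.intercalate, List.flatten, List.append_assoc]

theorem intercalate_head_append (sep a p : List Char) (L : List (List Char)) :
    sep.intercalate ((a ++ sep ++ p) :: L) = a ++ sep ++ sep.intercalate (p :: L) := by
  cases L with
  | nil => simp [List.intercalate]
  | cons b L => simp [intercalate_cons₂, List.append_assoc]

theorem intercalate_length (sep : List Char) :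
    ∀ (ps : List (List Char)) (p0 : List Char),
      (sep.intercalate (p0 :: ps)).length = p0.length + pvCost sep ps := by
  intro ps
  induction ps with
  | nil => intro p0; simp [List.intercalate, pvCost]
  | cons p ps ih =>
    intro p0
    rw [intercalate_cons₂]
    simp only [List.length_append, ih p, pvCost_cons]
    omega

theorem pvALoop_eq_takeFit (m : Int) (sep : List Char) :
    ∀ (ps : List (List Char)) (acc : List Char),
      pvALoop m sep acc ps = sep.intercalate (acc :: pvTakeFit m sep acc.length ps) := by
  intro ps
  induction ps with
  | nil => intro acc; simp [pvALoop, pvTakeFit, List.intercalate]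
  | cons p ps ih =>
    intro acc
    rw [pvALoop, pvTakeFit]
    split
    · simp [List.intercalate]
    · rw [ih (acc ++ sep ++ p)]
      rw [intercalate_head_append]
      rw [intercalate_cons₂]
      simp [Nat.add_assoc]

theorem pvTakeFit_all (m : Int) (sep : List Char) :
    ∀ (ps : List (List Char)) (c : Nat),
      (c : Int) + pvCost sep ps ≤ m → pvTakeFit m sep c ps = ps := by
  intro ps
  induction ps with
  | nil => intro c _; rfl
  | cons p ps ih =>
    intro c h
    rw [pvCost_cons] at h
    rw [pvTakeFit]
    rw [if_neg (by push_cast at h ⊢; omega)]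
    rw [ih (c + sep.length + p.length) (by push_cast at h ⊢; omega)]

theorem pvTakeFit_dropLast (m : Int) (sep : List Char) :
    ∀ (ps : List (List Char)) (c : Nat),
      m < (c : Int) + pvCost sep ps →
      pvTakeFit m sep c ps = pvTakeFit m sep c ps.dropLast := by
  intro ps
  induction ps with
  | nil => intro c _; rfl
  | cons p ps ih =>
    intro c h
    cases ps with
    | nil =>
      rw [pvCost_cons, pvCost_nil] at h
      have hdl : ([p] : List (List Char)).dropLast = [] := rfl
      rw [hdl]
      conv_lhs => rw [pvTakeFit]
      rw [if_pos (by push_cast at h ⊢; omega)]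
      rfl
    | cons q qs =>
      rw [List.dropLast_cons₂]
      conv_lhs => rw [pvTakeFit]
      conv_rhs => rw [pvTakeFit]
      split
      · rfl
      · rw [ih (c + sep.length + p.length)
            (by rw [pvCost_cons] at h; push_cast at h ⊢; omega)]

theorem pvBLoop_eq_takeFit (m : Int) (sep : List Char) (p0 : List Char) :
    ∀ (ps : List (List Char)),
      pvBLoop m sep (p0 :: ps) = p0 :: pvTakeFit m sep p0.length ps := by
  intro ps
  induction ps using List.reverseRecOn with
  | nil =>
    rw [pvBLoop.eq_def]
    rw [if_neg (by simp)]
    rfl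
  | append_singleton ps p ih =>
    rw [pvBLoop.eq_def]
    by_cases hfit : ((PySem.Chars.join sep (p0 :: (ps ++ [p]))).length : Int) ≤ m
    · rw [if_neg (by omega)]
      rw [pvTakeFit_all m sep (ps ++ [p]) p0.length
          (by simpa [PySem.Chars.join, intercalate_length] using hfit)]
    · rw [if_pos ⟨by simp, by omega⟩]
      have hdl : (p0 :: (ps ++ [p])).dropLast = p0 :: ps := by
        rw [show p0 :: (ps ++ [p]) = (p0 :: ps) ++ [p] by simp, List.dropLast_concat]
      rw [hdl, ih]
      rw [pvTakeFit_dropLast m sep (ps ++ [p]) p0.length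
          (by simp only [PySem.Chars.join, intercalate_length] at hfit; push_cast at hfit ⊢; omega)]
      rw [List.dropLast_concat]

theorem pvALoop_eq_join_pvBLoop (m : Int) (sep p0 : List Char) (ps : List (List Char)) :
    pvALoop m sep p0 ps = PySem.Chars.join sep (pvBLoop m sep (p0 :: ps)) := by
  rw [pvBLoop_eq_takeFit, PySem.Chars.join, pvALoop_eq_takeFit]

-- ===== VERDICT (by name: the statement is the Claim_ definition above) =====
theorem shorten_stem_spec : Claim_equal_shorten_stem := by
  intro stem max_length sep _ hpre
  obtain ⟨hsome, hor⟩ := hpre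
  unfold Spec_shorten_stem shorten_stem shorten_stem_alt
  simp only []
  by_cases hfit : (stem.toList.length : Int) ≤ max_length.getD 0
  · rw [if_pos hfit, if_pos hfit]
  · rw [if_neg hfit, if_neg hfit]
    have hsep : sep ≠ "" := hor.resolve_right hfit
    have hsepl : sep.toList.isEmpty = false := by
      cases hs : sep.toList with
      | nil => exact absurd (by apply String.ext; simp [hs]) hsep
      | cons a l => simp
    rw [PySem.Chars.split?, if_neg (by simp [hsepl])]
    cases PySem.Chars.splitOn stem.toList sep.toList with
    | nil =>
      show ("" : String) = String.ofList (PySem.Chars.join sep.toList (pvBLoop (max_length.getD 0) sep.toList []))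
      rw [pvBLoop.eq_def]
      simp [PySem.Chars.join, List.intercalate]
    | cons p0 rest =>
      exact congrArg String.ofList (pvALoop_eq_join_pvBLoop (max_length.getD 0) sep.toList p0 rest)
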